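-- pv_equiv track=rewrite | github.com/Preventera/AI-Risk-Sentinel | src/ai_risk_sentinel/core/compliance_checker.py | _infer_model_type
-- ===== SOURCE A (Python) =====
-- def _infer_model_type(model_id: str) -> str:
--     """Infer model type from model ID."""
--     model_id_lower = model_id.lower()
--
--     if any(x in model_id_lower for x in ["llama", "gpt", "mistral", "phi", "qwen"]):
--         return "LLM"
--     elif any(x in model_id_lower for x in ["clip", "vit", "resnet", "yolo"]):
--         return "Vision"
--     elif any(x in model_id_lower for x in ["whisper", "wav2vec"]):
--         return "Audio"
--     elif any(x in model_id_lower for x in ["bert", "roberta", "t5"]):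
--         return "Encoder"
--     else:
--         return "Unknown"
-- ===== SOURCE B (Python) =====
-- # Single left-to-right scan over string positions (naive multi-pattern scan):
-- # at each position, any keyword starting there lowers the running best rank.
-- _RANKED = [
--     ("llama", 0), ("gpt", 0), ("mistral", 0), ("phi", 0), ("qwen", 0),
--     ("clip", 1), ("vit", 1), ("resnet", 1), ("yolo", 1),
--     ("whisper", 2), ("wav2vec", 2),
--     ("bert", 3), ("roberta", 3), ("t5", 3),
-- ]
-- _CATS = ["LLM", "Vision", "Audio", "Encoder", "Unknown"]
--
--
-- def _infer_model_type(model_id: str) -> str: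
--     """Infer model type by one scan over positions, keeping the best (lowest) rank."""
--     m = model_id.lower()
--     best = 4
--     for i in range(len(m)):
--         for kw, rank in _RANKED:
--             if rank < best and m.startswith(kw, i):
--                 best = rank
--     return _CATS[best]
-- ===== Notes on version B (the rewrite author's own statement) =====
-- stated objective: alternative
-- what changed: Instead of running a substring search per keyword group in an if/elif chain, B makes one left-to-right scan over string positions, checking at each position which ranked keyword starts there and keeping the minimum rank, then maps the rank to its category.
import Mathlib
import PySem

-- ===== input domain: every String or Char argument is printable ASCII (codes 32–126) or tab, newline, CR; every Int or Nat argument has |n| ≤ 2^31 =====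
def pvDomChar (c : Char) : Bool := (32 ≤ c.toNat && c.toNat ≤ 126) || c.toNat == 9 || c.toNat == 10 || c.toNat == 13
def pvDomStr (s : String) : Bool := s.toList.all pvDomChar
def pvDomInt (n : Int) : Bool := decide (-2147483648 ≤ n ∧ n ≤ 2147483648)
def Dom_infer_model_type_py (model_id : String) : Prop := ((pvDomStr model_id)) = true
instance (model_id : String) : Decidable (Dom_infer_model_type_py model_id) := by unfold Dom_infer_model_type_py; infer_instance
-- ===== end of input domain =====

-- B replaces A's per-keyword substring searches in an if/elif chain by a single
-- left-to-right scan over positions keeping the minimum keyword rank (objective: alternative).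

-- ===== PORT A =====
def infer_model_type_py (model_id : String) : String :=
  let model_id_lower := PySem.Str.lower model_id
  if ["llama", "gpt", "mistral", "phi", "qwen"].any (fun x => PySem.Str.isIn x model_id_lower) then "LLM"
  else if ["clip", "vit", "resnet", "yolo"].any (fun x => PySem.Str.isIn x model_id_lower) then "Vision"
  else if ["whisper", "wav2vec"].any (fun x => PySem.Str.isIn x model_id_lower) then "Audio"
  else if ["bert", "roberta", "t5"].any (fun x => PySem.Str.isIn x model_id_lower) then "Encoder"
  else "Unknown"

-- ===== PORT B =====
def pvRanked : List (List Char × Nat) :=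
  [("llama".toList, 0), ("gpt".toList, 0), ("mistral".toList, 0), ("phi".toList, 0), ("qwen".toList, 0),
   ("clip".toList, 1), ("vit".toList, 1), ("resnet".toList, 1), ("yolo".toList, 1),
   ("whisper".toList, 2), ("wav2vec".toList, 2),
   ("bert".toList, 3), ("roberta".toList, 3), ("t5".toList, 3)]

def pvCats : List String := ["LLM", "Vision", "Audio", "Encoder", "Unknown"]

-- the position loop: at position i the current suffix is the list argument;
-- m.startswith(kw, i) is exactly kw.isPrefixOf (current suffix)
def pvScan : List Char → Nat → Nat
  | [], best => best
  | c :: rest, best =>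
      pvScan rest
        (pvRanked.foldl
          (fun b p => if p.2 < b ∧ p.1.isPrefixOf (c :: rest) then p.2 else b) best)

def infer_model_type_py_alt (model_id : String) : String :=
  let m := (PySem.Str.lower model_id).toList
  pvCats.getD (pvScan m 4) "Unknown"

-- ===== PRECONDITION & SPEC =====
def Spec_infer_model_type_py (model_id : String) (out : String) : Prop := out = infer_model_type_py_alt model_id
instance (model_id : String) (out : String) : Decidable (Spec_infer_model_type_py model_id out) := by unfold Spec_infer_model_type_py; infer_instance

-- ===== CLAIM (what is proved, stated in full; the proofs are below) =====
def Claim_equal_infer_model_type_py : Prop := ∀ (model_id : String), Dom_infer_model_type_py model_id → Spec_infer_model_type_py model_id (infer_model_type_py model_id)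

-- ===== LEMMAS AND PROOFS =====

-- the inner fold lowers best to r iff some listed keyword of rank ≤ r starts here
theorem pv_foldl_le_iff (t : List Char) (l : List (List Char × Nat)) :
    ∀ b r, (l.foldl (fun b p => if p.2 < b ∧ p.1.isPrefixOf t then p.2 else b) b) ≤ r ↔
      b ≤ r ∨ ∃ p ∈ l, p.1.isPrefixOf t ∧ p.2 ≤ r := by
  induction l with
  | nil => simp
  | cons p l ih =>
      intro b r
      simp only [List.foldl_cons, ih, List.mem_cons]
      constructor
      · rintro (h | h)
        · by_cases hp : p.2 < b ∧ p.1.isPrefixOf t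
          · simp only [if_pos hp] at h
            exact Or.inr ⟨p, Or.inl rfl, hp.2, h⟩
          · simp only [if_neg hp] at h; exact Or.inl h
        · obtain ⟨q, hq, hpre, hr⟩ := h
          exact Or.inr ⟨q, Or.inr hq, hpre, hr⟩
      · rintro (h | ⟨q, hq | hq, hpre, hr⟩)
        · left; split_ifs with hp
          · omega
          · exact h
        · subst hq
          by_cases hp : q.2 < b ∧ q.1.isPrefixOf t
          · left; rw [if_pos hp]; exact hr
          · left; rw [if_neg hp]
            rcases Nat.lt_or_ge q.2 b with h1 | h1
            · exact absurd ⟨h1, hpre⟩ hp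
            · omega
        · exact Or.inr ⟨q, hq, hpre, hr⟩

-- pvScan reaches rank ≤ r iff some keyword of rank ≤ r starts at some position
theorem pvScan_le_iff (m : List Char) :
    ∀ b r, pvScan m b ≤ r ↔
      b ≤ r ∨ ∃ p ∈ pvRanked, p.2 ≤ r ∧ ∃ j, p.1.isPrefixOf (m.drop j) := by
  induction m with
  | nil =>
      intro b r
      simp only [pvScan, List.drop_nil]
      constructor
      · exact fun h => Or.inl h
      · rintro (h | ⟨p, hp, hr, j, hpre⟩)
        · exact h
        · exfalso
          have hne : p.1 ≠ [] := by
            revert hp; unfold pvRanked; intro hp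
            fin_cases hp <;> simp
          cases p1 : p.1 with
          | nil => exact hne p1
          | cons a as => rw [p1] at hpre; simp [List.isPrefixOf] at hpre
  | cons c rest ih =>
      intro b r
      simp only [pvScan, ih, pv_foldl_le_iff]
      constructor
      · rintro ((h | ⟨p, hp, hpre, hr⟩) | ⟨p, hp, hr, j, hpre⟩)
        · exact Or.inl h
        · exact Or.inr ⟨p, hp, hr, 0, by simpa using hpre⟩
        · exact Or.inr ⟨p, hp, hr, j + 1, by simpa using hpre⟩
      · rintro (h | ⟨p, hp, hr, j, hpre⟩)
        · exact Or.inl (Or.inl h)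
        · cases j with
          | zero => exact Or.inl (Or.inr ⟨p, hp, by simpa using hpre, hr⟩)
          | succ j => exact Or.inr ⟨p, hp, hr, j, by simpa using hpre⟩

-- restated through Chars.isIn
theorem pvScan_le_iff_isIn (m : List Char) (r : Nat) (hr : r < 4) :
    pvScan m 4 ≤ r ↔ ∃ p ∈ pvRanked, p.2 ≤ r ∧ PySem.Chars.isIn p.1 m = true := by
  rw [pvScan_le_iff]
  constructor
  · rintro (h | ⟨p, hp, h2, j, hpre⟩)
    · omega
    · refine ⟨p, hp, h2, ?_⟩
      rw [← PySem.Chars.exists_prefix_drop_iff_isIn]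
      exact ⟨j, List.isPrefixOf_iff_prefix.mp hpre⟩
  · rintro ⟨p, hp, h2, hin⟩
    obtain ⟨j, hpre⟩ := (PySem.Chars.exists_prefix_drop_iff_isIn p.1 m).mpr hin
    exact Or.inr ⟨p, hp, h2, j, List.isPrefixOf_iff_prefix.mpr hpre⟩

theorem pvScan_le_four (m : List Char) : pvScan m 4 ≤ 4 := by
  rw [pvScan_le_iff]; exact Or.inl le_rfl

-- rank characterisation with the keyword table spelled out
theorem pv_rank_iff (m : List Char) (r : Nat) (hr : r < 4) :
    pvScan m 4 ≤ r ↔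
      ((PySem.Chars.isIn "llama".toList m = true ∨ PySem.Chars.isIn "gpt".toList m = true ∨
        PySem.Chars.isIn "mistral".toList m = true ∨ PySem.Chars.isIn "phi".toList m = true ∨
        PySem.Chars.isIn "qwen".toList m = true) ∨
       (1 ≤ r ∧ (PySem.Chars.isIn "clip".toList m = true ∨ PySem.Chars.isIn "vit".toList m = true ∨
        PySem.Chars.isIn "resnet".toList m = true ∨ PySem.Chars.isIn "yolo".toList m = true)) ∨
       (2 ≤ r ∧ (PySem.Chars.isIn "whisper".toList m = true ∨ PySem.Chars.isIn "wav2vec".toList m = true)) ∨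
       (3 ≤ r ∧ (PySem.Chars.isIn "bert".toList m = true ∨ PySem.Chars.isIn "roberta".toList m = true ∨
        PySem.Chars.isIn "t5".toList m = true))) := by
  rw [pvScan_le_iff_isIn m r hr]
  constructor
  · rintro ⟨p, hp, h2, hin⟩
    simp only [pvRanked, List.mem_cons, List.not_mem_nil, or_false] at hp
    rcases hp with rfl|rfl|rfl|rfl|rfl|rfl|rfl|rfl|rfl|rfl|rfl|rfl|rfl|rfl
    · exact Or.inl (Or.inl hin)
    · exact Or.inl (Or.inr (Or.inl hin))
    · exact Or.inl (Or.inr (Or.inr (Or.inl hin)))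
    · exact Or.inl (Or.inr (Or.inr (Or.inr (Or.inl hin))))
    · exact Or.inl (Or.inr (Or.inr (Or.inr (Or.inr hin))))
    · exact Or.inr (Or.inl ⟨h2, Or.inl hin⟩)
    · exact Or.inr (Or.inl ⟨h2, Or.inr (Or.inl hin)⟩)
    · exact Or.inr (Or.inl ⟨h2, Or.inr (Or.inr (Or.inl hin))⟩)
    · exact Or.inr (Or.inl ⟨h2, Or.inr (Or.inr (Or.inr hin))⟩)
    · exact Or.inr (Or.inr (Or.inl ⟨h2, Or.inl hin⟩))
    · exact Or.inr (Or.inr (Or.inl ⟨h2, Or.inr hin⟩))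
    · exact Or.inr (Or.inr (Or.inr ⟨h2, Or.inl hin⟩))
    · exact Or.inr (Or.inr (Or.inr ⟨h2, Or.inr (Or.inl hin)⟩))
    · exact Or.inr (Or.inr (Or.inr ⟨h2, Or.inr (Or.inr hin)⟩))
  · rintro ((hin|hin|hin|hin|hin) | ⟨hr1, hin|hin|hin|hin⟩ | ⟨hr2, hin|hin⟩ | ⟨hr3, hin|hin|hin⟩)
    · exact ⟨("llama".toList, 0), by simp [pvRanked], Nat.zero_le r, hin⟩
    · exact ⟨("gpt".toList, 0), by simp [pvRanked], Nat.zero_le r, hin⟩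
    · exact ⟨("mistral".toList, 0), by simp [pvRanked], Nat.zero_le r, hin⟩
    · exact ⟨("phi".toList, 0), by simp [pvRanked], Nat.zero_le r, hin⟩
    · exact ⟨("qwen".toList, 0), by simp [pvRanked], Nat.zero_le r, hin⟩
    · exact ⟨("clip".toList, 1), by simp [pvRanked], hr1, hin⟩
    · exact ⟨("vit".toList, 1), by simp [pvRanked], hr1, hin⟩
    · exact ⟨("resnet".toList, 1), by simp [pvRanked], hr1, hin⟩
    · exact ⟨("yolo".toList, 1), by simp [pvRanked], hr1, hin⟩
    · exact ⟨("whisper".toList, 2), by simp [pvRanked], hr2, hin⟩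
    · exact ⟨("wav2vec".toList, 2), by simp [pvRanked], hr2, hin⟩
    · exact ⟨("bert".toList, 3), by simp [pvRanked], hr3, hin⟩
    · exact ⟨("roberta".toList, 3), by simp [pvRanked], hr3, hin⟩
    · exact ⟨("t5".toList, 3), by simp [pvRanked], hr3, hin⟩

-- ===== VERDICT (by name: the statement is the Claim_ definition above) =====
theorem infer_model_type_py_spec : Claim_equal_infer_model_type_py := by
  intro model_id _
  unfold Spec_infer_model_type_py infer_model_type_py infer_model_type_py_alt
  dsimp only
  set m : List Char := (PySem.Str.lower model_id).toList with hm
  have hA : ∀ (x : String), PySem.Str.isIn x (PySem.Str.lower model_id) = PySem.Chars.isIn x.toList m := by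
    intro x; simp [PySem.Str.isIn, hm]
  have S0 := pv_rank_iff m 0 (by norm_num)
  have S1 := pv_rank_iff m 1 (by norm_num)
  have S2 := pv_rank_iff m 2 (by norm_num)
  have S3 := pv_rank_iff m 3 (by norm_num)
  simp only [List.any_cons, List.any_nil, Bool.or_eq_true, Bool.false_eq_true, or_false, hA]
  split_ifs with h0 h1 h2 h3
  · have hle : pvScan m 4 ≤ 0 := S0.mpr (Or.inl h0)
    have h : pvScan m 4 = 0 := by omega
    rw [h]; rfl
  · have hle : pvScan m 4 ≤ 1 := S1.mpr (Or.inr (Or.inl ⟨le_rfl, h1⟩))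
    have hgt : ¬ pvScan m 4 ≤ 0 := fun h =>
      (S0.mp h).elim h0 (fun h' => h'.elim (fun x => by omega) (fun h'' => h''.elim (fun x => by omega) (fun x => by omega)))
    have h : pvScan m 4 = 1 := by omega
    rw [h]; rfl
  · have hle : pvScan m 4 ≤ 2 := S2.mpr (Or.inr (Or.inr (Or.inl ⟨le_rfl, h2⟩)))
    have hgt : ¬ pvScan m 4 ≤ 1 := fun h =>
      (S1.mp h).elim h0 (fun h' => h'.elim (fun x => h1 x.2) (fun h'' => h''.elim (fun x => by omega) (fun x => by omega)))
    have h : pvScan m 4 = 2 := by omega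
    rw [h]; rfl
  · have hle : pvScan m 4 ≤ 3 := S3.mpr (Or.inr (Or.inr (Or.inr ⟨le_rfl, h3⟩)))
    have hgt : ¬ pvScan m 4 ≤ 2 := fun h =>
      (S2.mp h).elim h0 (fun h' => h'.elim (fun x => h1 x.2) (fun h'' => h''.elim (fun x => h2 x.2) (fun x => by omega)))
    have h : pvScan m 4 = 3 := by omega
    rw [h]; rfl
  · have hgt : ¬ pvScan m 4 ≤ 3 := fun h =>
      (S3.mp h).elim h0 (fun h' => h'.elim (fun x => h1 x.2) (fun h'' => h''.elim (fun x => h2 x.2) (fun x => h3 x.2)))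
    have h : pvScan m 4 = 4 := by have := pvScan_le_four m; omega
    rw [h]; rfl
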